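-- pv_equiv track=rewrite | github.com/Ace91Ace/GFG | Difficulty: Medium/Check if frequencies can be equal/check-if-frequencies-can-be-equal.py | sameFreq
-- ===== SOURCE A (Python) =====
-- from collections import Counter
--
-- def sameFreq(s: str) -> bool:
--     c1 = Counter(s)
--     c = [c1[i] for i in c1]
--     if len(set(c)) > 2:
--         return False
--     c2 = Counter(c)
--     if len(set(c)) == 1:
--         return True
--     if 1 in c2 and c2[1] == 1:
--         return True
--     if len(c2) == 2:
--         (f1, n1), (f2, n2) = c2.items()
--         if abs(f1 - f2) == 1 and ((f1 > f2 and n1 == 1) or (f2 > f1 and n2 == 1)):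
--             return True
--     return False
-- ===== SOURCE B (Python) =====
-- from collections import Counter
--
-- def sameFreq(s: str) -> bool:
--     cnt = Counter(s)
--     vals = list(cnt.values())
--     if vals and len(set(vals)) == 1:
--         return True
--     for ch in cnt:
--         rest = [v - 1 if c == ch else v for c, v in cnt.items()]
--         rest = [v for v in rest if v > 0]
--         if rest and len(set(rest)) == 1:
--             return True
--     return False
-- ===== Notes on version B (the rewrite author's own statement) =====
-- stated objective: alternative
-- what changed: Replaces A's frequency-of-frequency case analysis (set-size tests on Counter-of-counts plus a two-item destructuring branch) with a direct trial-removal search: for each distinct character, decrement its count, drop zeros, and test whether the remaining counts are all equal.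
import Mathlib
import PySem

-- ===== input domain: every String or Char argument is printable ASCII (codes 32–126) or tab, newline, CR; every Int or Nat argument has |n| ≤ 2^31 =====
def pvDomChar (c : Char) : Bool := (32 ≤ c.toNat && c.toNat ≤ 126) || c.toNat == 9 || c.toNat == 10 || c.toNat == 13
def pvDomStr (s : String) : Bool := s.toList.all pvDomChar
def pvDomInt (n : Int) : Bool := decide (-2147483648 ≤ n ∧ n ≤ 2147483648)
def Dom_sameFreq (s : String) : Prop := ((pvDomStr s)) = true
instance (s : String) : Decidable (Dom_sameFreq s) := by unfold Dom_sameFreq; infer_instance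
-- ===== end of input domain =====

-- B replaces A's frequency-of-frequency case analysis with a direct trial-removal search
-- over the distinct characters (objective: alternative).

-- ===== PORT A =====
def sameFreq (s : String) : Bool :=
  let c1 : PySem.Dict Char Int := PySem.Dict.counter s.toList          -- c1 = Counter(s)
  let c : List Int := c1.keys.map (fun i => c1.getD i 0)               -- c = [c1[i] for i in c1]
  if 2 < (PySem.Set.ofList c).length then false                        -- if len(set(c)) > 2: return False
  else if (PySem.Set.ofList c).length = 1 then true                    -- if len(set(c)) == 1: return True
  else if (PySem.Dict.counter c).contains 1
          && (PySem.Dict.counter c).getD 1 0 == 1 then true            -- if 1 in c2 and c2[1] == 1: return True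
  else if (PySem.Dict.counter c).size = 2 then                         -- if len(c2) == 2
    match (PySem.Dict.counter c).items with
    | [(f1, n1), (f2, n2)] =>                                          -- (f1, n1), (f2, n2) = c2.items()
      if (f1 - f2).natAbs = 1 ∧ ((f2 < f1 ∧ n1 = 1) ∨ (f1 < f2 ∧ n2 = 1)) then true
      else false
    | _ => false                                                       -- (unreachable: size = 2 is checked)
  else false

-- ===== PORT B =====
def sameFreq_alt (s : String) : Bool :=
  let cnt : PySem.Dict Char Int := PySem.Dict.counter s.toList         -- cnt = Counter(s)
  let vals : List Int := cnt.values                                    -- vals = list(cnt.values())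
  if vals ≠ [] ∧ (PySem.Set.ofList vals).length = 1 then true          -- if vals and len(set(vals)) == 1
  else
    cnt.keys.any (fun ch =>                                            -- for ch in cnt: … return True / return False
      let rest0 := cnt.items.map (fun cv => if cv.1 == ch then cv.2 - 1 else cv.2)
      let rest := rest0.filter (fun v => decide (0 < v))               -- rest = [v for v in rest if v > 0]
      decide (rest ≠ [] ∧ (PySem.Set.ofList rest).length = 1))         -- if rest and len(set(rest)) == 1

-- ===== PRECONDITION & SPEC =====
def Spec_sameFreq (s : String) (out : Bool) : Prop := out = sameFreq_alt s
instance (s : String) (out : Bool) : Decidable (Spec_sameFreq s out) := by unfold Spec_sameFreq; infer_instance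

-- ===== CLAIM (what is proved, stated in full; the proofs are below) =====
def Claim_equal_sameFreq : Prop := ∀ (s : String), Dom_sameFreq s → Spec_sameFreq s (sameFreq s)

-- ===== LEMMAS AND PROOFS =====

-- A's decision, as a function of the list of character counts
def aCore (c : List Int) : Bool :=
  if 2 < (PySem.Set.ofList c).length then false
  else if (PySem.Set.ofList c).length = 1 then true
  else if (PySem.Dict.counter c).contains 1
          && (PySem.Dict.counter c).getD 1 0 == 1 then true
  else if (PySem.Dict.counter c).size = 2 then
    match (PySem.Dict.counter c).items with
    | [(f1, n1), (f2, n2)] =>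
      if (f1 - f2).natAbs = 1 ∧ ((f2 < f1 ∧ n1 = 1) ∨ (f1 < f2 ∧ n2 = 1)) then true
      else false
    | _ => false
  else false

-- the loop-body test of B: the positive counts left after one decrement are nonempty and all equal
def goodList (l : List Int) : Bool :=
  decide (l.filter (fun v => decide (0 < v)) ≠ []
          ∧ (PySem.Set.ofList (l.filter (fun v => decide (0 < v)))).length = 1)

-- B's decision, as a function of the list of character counts (the trial at the j-th
-- distinct character decrements position j of the value list)
def bCore (vals : List Int) : Bool :=
  if vals ≠ [] ∧ (PySem.Set.ofList vals).length = 1 then true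
  else (List.range vals.length).any (fun j => goodList (vals.set j (vals.getD j 0 - 1)))

theorem ofList_nil_iff {α : Type} [BEq α] [LawfulBEq α] (l : List α) :
    PySem.Set.ofList l = [] ↔ l = [] := by
  constructor
  · intro h
    cases l with
    | nil => rfl
    | cons x t =>
      have : x ∈ PySem.Set.ofList (x :: t) := (PySem.Set.mem_ofList _ _).mpr (by simp)
      rw [h] at this; simp at this
  · rintro rfl; rfl

theorem foldl_add_singleton {α : Type} [BEq α] [LawfulBEq α] (e : α) (t : List α)
    (h : ∀ u ∈ t, u = e) : t.foldl PySem.Set.add [e] = [e] := by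
  induction t with
  | nil => rfl
  | cons x t ih =>
    have hx : x = e := h x (by simp)
    subst hx
    have : PySem.Set.add [x] x = [x] := by
      simp [PySem.Set.add, PySem.Set.contains]
    rw [List.foldl_cons, this]
    exact ih fun u hu => h u (by simp [hu])

theorem ofList_singleton_of {α : Type} [BEq α] [LawfulBEq α] {l : List α} {e : α}
    (hne : l ≠ []) (h : ∀ u ∈ l, u = e) : PySem.Set.ofList l = [e] := by
  cases l with
  | nil => exact absurd rfl hne
  | cons x t =>
    have hx : x = e := h x (by simp)
    subst hx
    rw [PySem.Set.ofList_eq_foldl, List.foldl_cons]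
    have : PySem.Set.add [] x = [x] := by simp [PySem.Set.add, PySem.Set.contains]
    rw [this]
    exact foldl_add_singleton x t fun u hu => h u (by simp [hu])

theorem all_eq_of_setlen_one {α : Type} [BEq α] [LawfulBEq α] {l : List α}
    (h : (PySem.Set.ofList l).length = 1) : ∀ u ∈ l, ∀ w ∈ l, u = w := by
  obtain ⟨e, he⟩ := List.length_eq_one_iff.mp h
  intro u hu w hw
  have hu' : u ∈ PySem.Set.ofList l := (PySem.Set.mem_ofList _ _).mpr hu
  have hw' : w ∈ PySem.Set.ofList l := (PySem.Set.mem_ofList _ _).mpr hw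
  rw [he] at hu' hw'
  simp at hu' hw'
  rw [hu', hw']

theorem good_iff (l : List Int) :
    goodList l = true ↔ ∃ e, e ∈ l ∧ 0 < e ∧ ∀ u ∈ l, 0 < u → u = e := by
  unfold goodList
  rw [decide_eq_true_iff]
  constructor
  · rintro ⟨hne, hlen⟩
    obtain ⟨e, he⟩ := List.exists_mem_of_ne_nil _ hne
    have hel := List.mem_filter.mp he
    refine ⟨e, hel.1, by simpa using hel.2, ?_⟩
    intro u hu hupos
    exact all_eq_of_setlen_one hlen u (List.mem_filter.mpr ⟨hu, by simpa using hupos⟩) e he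
  · rintro ⟨e, hel, hepos, hall⟩
    have hef : e ∈ l.filter (fun v => decide (0 < v)) :=
      List.mem_filter.mpr ⟨hel, by simpa using hepos⟩
    have hne : l.filter (fun v => decide (0 < v)) ≠ [] := by
      intro h; rw [h] at hef; simp at hef
    refine ⟨hne, ?_⟩
    have hsing : PySem.Set.ofList (l.filter (fun v => decide (0 < v))) = [e] := by
      apply ofList_singleton_of hne
      intro u hu
      have := List.mem_filter.mp hu
      exact hall u this.1 (by simpa using this.2)
    rw [hsing]
    rfl

theorem count_set_int (l : List Int) (j : Nat) (h : j < l.length) (y v : Int) :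
    ((l.set j y).count v : Int)
      = l.count v - (if l[j] = v then 1 else 0) + (if y = v then 1 else 0) := by
  have hset : l.set j y = l.take j ++ y :: l.drop (j + 1) := by
    rw [List.set_eq_take_append_cons_drop]
    simp [h]
  have hcl : l.count v = (l.take j).count v + (if l[j] = v then 1 else 0)
      + (l.drop (j + 1)).count v := by
    conv_lhs => rw [← List.take_append_drop j l, List.drop_eq_getElem_cons h]
    rw [List.count_append, List.count_cons]
    simp only [beq_iff_eq]
    by_cases hv : l[j] = v
    · simp [hv]; omega
    · simp [hv]
  rw [hset, hcl]
  simp [List.count_append, List.count_cons]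
  split_ifs <;> ring

-- removing one occurrence of x (count 1, where x is 1 or one above the other value o)
-- leaves all remaining positive counts equal
theorem good_at (vals : List Int) (x o : Int) (hxo : x ≠ o)
    (hmem : ∀ v ∈ vals, v = x ∨ v = o) (hov : o ∈ vals) (ho1 : 1 ≤ o)
    (hcx : vals.count x = 1) (hx : x = 1 ∨ x = o + 1)
    (j : Nat) (hj : j < vals.length) (hjx : vals[j] = x) :
    goodList (vals.set j (x - 1)) = true := by
  apply (good_iff _).mpr
  have hco : 0 < vals.count o := List.count_pos_iff.mpr hov
  have hcso := count_set_int vals j hj (x - 1) o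
  rw [hjx] at hcso
  refine ⟨o, ?_, by omega, ?_⟩
  · have : 0 < ((vals.set j (x - 1)).count o : Int) := by
      rw [hcso]; split_ifs <;> omega
    exact List.count_pos_iff.mp (by exact_mod_cast this)
  · intro u hu hupos
    by_contra hne
    have hcu := count_set_int vals j hj (x - 1) u
    rw [hjx] at hcu
    have hupos' : (0 : Int) < ((vals.set j (x - 1)).count u : Int) := by
      exact_mod_cast List.count_pos_iff.mpr hu
    by_cases hux : u = x
    · subst hux
      rw [hcx] at hcu
      rw [hcu] at hupos'
      split_ifs at hupos' <;> omega
    · have hnotin : u ∉ vals := by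
        intro hv
        rcases hmem u hv with h | h
        · exact hux h
        · exact hne h
      have hcu0 : vals.count u = 0 := List.count_eq_zero.mpr hnotin
      rw [hcu0] at hcu
      rw [hcu] at hupos'
      split_ifs at hupos' <;> omega

-- conversely, a successful trial at an occurrence of x forces A's success condition
theorem cond_of_good (vals : List Int) (x o : Int) (hxo : x ≠ o)
    (hmem : ∀ v ∈ vals, v = x ∨ v = o) (hov : o ∈ vals) (ho1 : 1 ≤ o) (hx1 : 1 ≤ x)
    (j : Nat) (hj : j < vals.length) (hjx : vals[j] = x)
    (hg : goodList (vals.set j (x - 1)) = true) :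
    vals.count x = 1 ∧ (x = 1 ∨ x = o + 1) := by
  obtain ⟨e, hemem, hepos, hall⟩ := (good_iff _).mp hg
  have hco : 0 < vals.count o := List.count_pos_iff.mpr hov
  have hcso := count_set_int vals j hj (x - 1) o
  rw [hjx] at hcso
  have hoset : o ∈ vals.set j (x - 1) := by
    have : 0 < ((vals.set j (x - 1)).count o : Int) := by
      rw [hcso]; split_ifs <;> omega
    exact List.count_pos_iff.mp (by exact_mod_cast this)
  have heo : e = o := (hall o hoset (by omega)).symm
  subst heo
  have hxv : x ∈ vals := by rw [← hjx]; exact List.getElem_mem hj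
  have hxle : 0 < vals.count x := List.count_pos_iff.mpr hxv
  have hcsx := count_set_int vals j hj (x - 1) x
  rw [hjx] at hcsx
  have hcx1 : vals.count x = 1 := by
    by_contra hc
    have hxset : x ∈ vals.set j (x - 1) := by
      have : 0 < ((vals.set j (x - 1)).count x : Int) := by
        rw [hcsx]; split_ifs <;> omega
      exact List.count_pos_iff.mp (by exact_mod_cast this)
    exact hxo (hall x hxset (by omega))
  refine ⟨hcx1, ?_⟩
  have hcsx1 := count_set_int vals j hj (x - 1) (x - 1)
  rw [hjx] at hcsx1
  have hmem1 : x - 1 ∈ vals.set j (x - 1) := by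
    have : 0 < ((vals.set j (x - 1)).count (x - 1) : Int) := by
      rw [hcsx1]; split_ifs <;> omega
    exact List.count_pos_iff.mp (by exact_mod_cast this)
  by_cases hxx : 1 ≤ x - 1
  · have := hall (x - 1) hmem1 (by omega)
    right; omega
  · left; omega

theorem mem_set_of_ne (vals : List Int) (j : Nat) (hj : j < vals.length) (u y : Int)
    (hu : u ∈ vals) (hne : u ≠ vals[j]) : u ∈ vals.set j y := by
  have hc := count_set_int vals j hj y u
  have hpos : 0 < vals.count u := List.count_pos_iff.mpr hu
  have : 0 < ((vals.set j y).count u : Int) := by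
    rw [hc]; split_ifs <;> omega
  exact List.count_pos_iff.mp (by exact_mod_cast this)

theorem bCore_eq_any (vals : List Int) (hno : (PySem.Set.ofList vals).length ≠ 1) :
    bCore vals = true ↔ ∃ j, ∃ h : j < vals.length, goodList (vals.set j (vals[j] - 1)) = true := by
  unfold bCore
  rw [if_neg (by tauto), List.any_eq_true]
  constructor
  · rintro ⟨j, hjr, hp⟩
    have hj : j < vals.length := List.mem_range.mp hjr
    rw [List.getD_eq_getElem _ _ hj] at hp
    exact ⟨j, hj, hp⟩
  · rintro ⟨j, hj, hp⟩
    refine ⟨j, List.mem_range.mpr hj, ?_⟩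
    rw [List.getD_eq_getElem _ _ hj]
    exact hp

-- the heart of the file: on any list of positive counts the two decisions agree
theorem core_eq (vals : List Int) (h1 : ∀ v ∈ vals, 1 ≤ v) : aCore vals = bCore vals := by
  rcases hS : PySem.Set.ofList vals with _ | ⟨a, _ | ⟨b, _ | ⟨c, t⟩⟩⟩
  · -- no distinct count: vals = [], both sides are False
    have hv : vals = [] := (ofList_nil_iff vals).mp hS
    subst hv; decide
  · -- one distinct count: both sides are True
    have hav : a ∈ vals := (PySem.Set.mem_ofList _ _).mp (by rw [hS]; simp)
    have hvne : vals ≠ [] := by rintro rfl; simp at hav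
    unfold aCore bCore
    rw [hS]
    simp [hvne]
  · -- two distinct counts: the interesting case
    have hnd := PySem.Set.nodup_ofList vals
    rw [hS] at hnd
    have hab : a ≠ b := by simp at hnd; tauto
    have hav : a ∈ vals := (PySem.Set.mem_ofList _ _).mp (by rw [hS]; simp)
    have hbv : b ∈ vals := (PySem.Set.mem_ofList _ _).mp (by rw [hS]; simp)
    have hmem : ∀ v ∈ vals, v = a ∨ v = b := by
      intro v hv
      have := (PySem.Set.mem_ofList _ _).mpr hv
      rw [hS] at this; simpa using this
    have hmem' : ∀ v ∈ vals, v = b ∨ v = a := fun v hv => (hmem v hv).symm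
    have ha1 : 1 ≤ a := h1 a hav
    have hb1 : 1 ≤ b := h1 b hbv
    have hA : aCore vals = true ↔
        ((1 ∈ vals ∧ vals.count 1 = 1) ∨
          ((a - b).natAbs = 1 ∧ ((b < a ∧ (vals.count a : Int) = 1) ∨ (a < b ∧ (vals.count b : Int) = 1)))) := by
      unfold aCore
      rw [PySem.Dict.items_counter, hS]
      simp [PySem.Dict.contains_counter, PySem.Dict.getD_counter, PySem.Dict.size,
        PySem.Dict.items_counter, hS, beq_iff_eq]
    have hB := bCore_eq_any vals (by rw [hS]; simp)
    rw [Bool.eq_iff_iff, hA, hB]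
    constructor
    · rintro (⟨h1v, hc1⟩ | ⟨habs, ⟨hba, hca⟩ | ⟨hab', hcb⟩⟩)
      · rcases hmem 1 h1v with h1a | h1b
        · obtain ⟨j, hj, hjx⟩ := List.mem_iff_getElem.mp hav
          refine ⟨j, hj, ?_⟩
          rw [hjx]
          exact good_at vals a b hab hmem hbv hb1 (by rw [h1a] at hc1; exact hc1)
            (Or.inl h1a.symm) j hj hjx
        · obtain ⟨j, hj, hjx⟩ := List.mem_iff_getElem.mp hbv
          refine ⟨j, hj, ?_⟩
          rw [hjx]
          exact good_at vals b a hab.symm hmem' hav ha1 (by rw [h1b] at hc1; exact hc1)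
            (Or.inl h1b.symm) j hj hjx
      · obtain ⟨j, hj, hjx⟩ := List.mem_iff_getElem.mp hav
        refine ⟨j, hj, ?_⟩
        rw [hjx]
        exact good_at vals a b hab hmem hbv hb1 (by exact_mod_cast hca)
          (Or.inr (by omega)) j hj hjx
      · obtain ⟨j, hj, hjx⟩ := List.mem_iff_getElem.mp hbv
        refine ⟨j, hj, ?_⟩
        rw [hjx]
        exact good_at vals b a hab.symm hmem' hav ha1 (by exact_mod_cast hcb)
          (Or.inr (by omega)) j hj hjx
    · rintro ⟨j, hj, hg⟩
      have hxv : vals[j] ∈ vals := List.getElem_mem hj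
      rcases hmem _ hxv with hx | hx
      · rw [hx] at hg
        obtain ⟨hcx, hax⟩ := cond_of_good vals a b hab hmem hbv hb1 ha1 j hj hx hg
        rcases hax with ha1' | hab1
        · left
          exact ⟨by rw [← ha1']; exact hav, by rw [← ha1']; exact hcx⟩
        · right
          exact ⟨by omega, Or.inl ⟨by omega, by exact_mod_cast hcx⟩⟩
      · rw [hx] at hg
        obtain ⟨hcx, hbx⟩ := cond_of_good vals b a hab.symm hmem' hav ha1 hb1 j hj hx hg
        rcases hbx with hb1' | hba1
        · left
          exact ⟨by rw [← hb1']; exact hbv, by rw [← hb1']; exact hcx⟩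
        · right
          exact ⟨by omega, Or.inr ⟨by omega, by exact_mod_cast hcx⟩⟩
  · -- three or more distinct counts: both sides are False
    have hnd := PySem.Set.nodup_ofList vals
    rw [hS] at hnd
    have hA : aCore vals = false := by
      unfold aCore
      rw [hS]
      simp
    rw [hA]
    have hno : (PySem.Set.ofList vals).length ≠ 1 := by rw [hS]; simp
    have hmm : ∀ v, v ∈ (a :: b :: c :: t) → v ∈ vals := by
      intro v hv
      exact (PySem.Set.mem_ofList _ _).mp (by rw [hS]; exact hv)
    symm
    rw [Bool.eq_false_iff]
    intro hb
    obtain ⟨j, hj, hg⟩ := (bCore_eq_any vals hno).mp hb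
    obtain ⟨e, hemem, hepos, hall⟩ := (good_iff _).mp hg
    have hane : a ≠ b := by simp at hnd; tauto
    have hanc : a ≠ c := by simp at hnd; tauto
    have hbnc : b ≠ c := by simp at hnd; tauto
    have key : ∀ u, u ∈ vals → u ≠ vals[j] → u = e := by
      intro u hu hne
      exact hall u (mem_set_of_ne vals j hj u _ hu hne) (by have := h1 u hu; omega)
    obtain ⟨u, w, huv, hwv, hunw, hux, hwx⟩ :
        ∃ u w, u ∈ vals ∧ w ∈ vals ∧ u ≠ w ∧ u ≠ vals[j] ∧ w ≠ vals[j] := by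
      by_cases hxa : a = vals[j]
      · exact ⟨b, c, hmm b (by simp), hmm c (by simp), hbnc, by omega, by omega⟩
      · by_cases hxb : b = vals[j]
        · exact ⟨a, c, hmm a (by simp), hmm c (by simp), hanc, by omega, by omega⟩
        · exact ⟨a, b, hmm a (by simp), hmm b (by simp), hane, by omega, by omega⟩
    exact hunw ((key u huv hux).trans (key w hwv hwx).symm)

theorem keysmap_eq_values (xs : List Char) :
    (PySem.Dict.counter xs).keys.map (fun i => (PySem.Dict.counter xs).getD i 0)
      = (PySem.Dict.counter xs).values := by
  simp [PySem.Dict.keys_counter, PySem.Dict.getD_counter, PySem.Dict.values,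
    PySem.Dict.items_counter, List.map_map, Function.comp]

theorem values_counter_pos (s : String) :
    ∀ v ∈ (PySem.Dict.counter s.toList).values, 1 ≤ v := by
  intro v hv
  simp [PySem.Dict.values, PySem.Dict.items_counter, List.map_map, Function.comp] at hv
  obtain ⟨k, hk, rfl⟩ := hv
  exact_mod_cast List.count_pos_iff.mpr hk

theorem map_dec_eq_set {κ : Type} [BEq κ] [LawfulBEq κ] (K : List κ) (f : κ → Int)
    (hnd : K.Nodup) (j : Nat) (hj : j < K.length) :
    (K.map (fun k => (k, f k))).map (fun cv => if cv.1 == K[j] then cv.2 - 1 else cv.2)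
      = (K.map f).set j ((K.map f).getD j 0 - 1) := by
  apply List.ext_getElem
  · simp
  intro i h1 h2
  have hi : i < K.length := by simpa using h1
  have hgetD : (K.map f).getD j 0 = f K[j] := by
    rw [List.getD_eq_getElem _ _ (by simpa using hj)]; simp
  rw [List.getElem_set]
  simp only [List.map_map, List.getElem_map, Function.comp, beq_iff_eq]
  simp only [hgetD]
  by_cases hij : j = i
  · subst hij
    simp
  · have : ¬ K[i] = K[j] := fun h => hij ((hnd.getElem_inj_iff).mp h).symm
    simp [this, hij]

theorem portA_core (s : String) :
    sameFreq s = aCore ((PySem.Dict.counter s.toList).values) := by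
  show aCore ((PySem.Dict.counter s.toList).keys.map
      (fun i => (PySem.Dict.counter s.toList).getD i 0)) = _
  rw [keysmap_eq_values]

theorem portB_core (s : String) :
    sameFreq_alt s = bCore ((PySem.Dict.counter s.toList).values) := by
  unfold sameFreq_alt bCore
  simp only []
  split_ifs with h
  · rfl
  · have hval : (PySem.Dict.counter s.toList).values
        = (PySem.Set.ofList s.toList).map (fun k => (s.toList.count k : Int)) := by
      simp [PySem.Dict.values, PySem.Dict.items_counter, List.map_map, Function.comp]
    have hitems := PySem.Dict.items_counter s.toList
    have hkeys := PySem.Dict.keys_counter s.toList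
    have hnd : (PySem.Set.ofList s.toList).Nodup := PySem.Set.nodup_ofList _
    set K := PySem.Set.ofList s.toList with hK
    set f : Char → Int := fun k => (s.toList.count k : Int) with hf
    apply Bool.eq_iff_iff.mpr
    rw [List.any_eq_true, List.any_eq_true]
    constructor
    · rintro ⟨ch, hch, hp⟩
      rw [hkeys] at hch
      obtain ⟨j, hj, rfl⟩ := List.mem_iff_getElem.mp hch
      refine ⟨j, by simp [hval, List.mem_range, hj], ?_⟩
      show goodList _ = true
      rw [hval, ← map_dec_eq_set K f hnd j hj]
      rw [hitems] at hp
      exact hp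
    · rintro ⟨j, hjr, hp⟩
      have hj : j < K.length := by
        simpa [hval, List.mem_range] using hjr
      refine ⟨K[j], by rw [hkeys]; exact List.getElem_mem hj, ?_⟩
      rw [hitems]
      show goodList ((K.map (fun k => (k, f k))).map
        (fun cv => if cv.1 == K[j] then cv.2 - 1 else cv.2)) = true
      rw [map_dec_eq_set K f hnd j hj]
      rw [hval] at hp
      exact hp

-- ===== VERDICT (by name: the statement is the Claim_ definition above) =====
theorem sameFreq_spec : Claim_equal_sameFreq := by
  intro s _
  unfold Spec_sameFreq
  rw [portA_core, portB_core, core_eq _ (values_counter_pos s)]
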